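-- pv_equiv track=rewrite | github.com/ugm616/EnkripshunDik | exe/EnkripshunDik.py | murmurhash3
-- ===== SOURCE A (Python) =====
-- def murmurhash3(key, seed):
--     """Implementation of MurmurHash3 for generating random values"""
--     c1 = 0xcc9e2d51
--     c2 = 0x1b873593
--     length = len(key)
--     h1 = seed & 0xffffffff
--     roundedEnd = (length & 0xfffffffc)  # round down to 4 byte block
--
--     # Body
--     i = 0
--     while i < roundedEnd:
--         # Get 4 bytes as an int
--         k1 = ((key[i] & 0xff) |
--              ((key[i + 1] & 0xff) << 8) |
--              ((key[i + 2] & 0xff) << 16) |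
--              ((key[i + 3] & 0xff) << 24))
--
--         k1 = (k1 * c1) & 0xffffffff
--         k1 = ((k1 << 15) | (k1 >> 17)) & 0xffffffff  # ROTL32(k1,15)
--         k1 = (k1 * c2) & 0xffffffff
--
--         h1 ^= k1
--         h1 = ((h1 << 13) | (h1 >> 19)) & 0xffffffff  # ROTL32(h1,13)
--         h1 = (h1 * 5 + 0xe6546b64) & 0xffffffff
--
--         i += 4
--
--     # Tail
--     k1 = 0
--     val = length & 0x03
--     if val == 3:
--         k1 = (key[roundedEnd + 2] & 0xff) << 16
--     if val in [2, 3]: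
--         k1 |= (key[roundedEnd + 1] & 0xff) << 8
--     if val in [1, 2, 3]:
--         k1 |= key[roundedEnd] & 0xff
--         k1 = (k1 * c1) & 0xffffffff
--         k1 = ((k1 << 15) | (k1 >> 17)) & 0xffffffff  # ROTL32(k1,15)
--         k1 = (k1 * c2) & 0xffffffff
--         h1 ^= k1
--
--     # Finalization
--     h1 ^= length
--     h1 ^= h1 >> 16
--     h1 = (h1 * 0x85ebca6b) & 0xffffffff
--     h1 ^= h1 >> 13
--     h1 = (h1 * 0xc2b2ae35) & 0xffffffff
--     h1 ^= h1 >> 16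
--
--     return h1 & 0xffffffff
-- ===== SOURCE B (Python) =====
-- def murmurhash3(key, seed):
--     """Streaming one-pass MurmurHash3 (32-bit): accumulate bytes into k1, mix on each full 4-byte group."""
--     M = 0xffffffff
--     h1 = seed & M
--     k1 = 0
--     cnt = 0
--     for byte in key:
--         k1 |= (byte & 0xff) << (8 * cnt)
--         cnt += 1
--         if cnt == 4:
--             k1 = (k1 * 0xcc9e2d51) & M
--             k1 = ((k1 << 15) | (k1 >> 17)) & M
--             k1 = (k1 * 0x1b873593) & M
--             h1 ^= k1
--             h1 = ((h1 << 13) | (h1 >> 19)) & M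
--             h1 = (h1 * 5 + 0xe6546b64) & M
--             k1 = 0
--             cnt = 0
--     if cnt != 0:
--         k1 = (k1 * 0xcc9e2d51) & M
--         k1 = ((k1 << 15) | (k1 >> 17)) & M
--         k1 = (k1 * 0x1b873593) & M
--         h1 ^= k1
--     h1 ^= len(key)
--     h1 ^= h1 >> 16
--     h1 = (h1 * 0x85ebca6b) & M
--     h1 ^= h1 >> 13
--     h1 = (h1 * 0xc2b2ae35) & M
--     h1 ^= h1 >> 16
--     return h1
-- ===== Notes on version B (the rewrite author's own statement) =====
-- stated objective: alternative
-- what changed: Replaces A's indexed while-loop over 4-byte blocks plus a separate 3-way tail switch with a single streaming fold over the bytes that accumulates k1 at shift 8*cnt and flushes the block mix whenever a 4-byte group completes, applying the tail scramble to the leftover partial k1.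
import Mathlib
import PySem

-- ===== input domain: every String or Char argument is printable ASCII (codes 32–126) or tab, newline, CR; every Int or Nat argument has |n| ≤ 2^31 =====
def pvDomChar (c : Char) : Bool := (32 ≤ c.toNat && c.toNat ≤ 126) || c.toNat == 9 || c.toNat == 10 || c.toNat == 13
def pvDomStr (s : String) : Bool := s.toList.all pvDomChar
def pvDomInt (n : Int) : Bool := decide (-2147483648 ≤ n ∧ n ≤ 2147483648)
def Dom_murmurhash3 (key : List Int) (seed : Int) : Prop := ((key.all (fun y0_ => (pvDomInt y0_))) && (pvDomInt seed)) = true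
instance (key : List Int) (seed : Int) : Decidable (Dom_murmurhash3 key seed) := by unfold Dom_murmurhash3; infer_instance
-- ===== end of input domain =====

-- B re-implements the hash as one streaming fold over the bytes (running k1 + group counter)
-- instead of A's indexed 4-byte block loop followed by a separate tail switch; same cost, alternative decomposition.
-- Bitwise notes (exact here): 'x & 0xff' = x % 256, '& 0xffffffff' = % 2^32, '<<'/'>>' on the
-- masked non-negative values = *,/ by powers of two, and each '|' joins disjoint bit ranges, so it is '+'.

-- ===== PORT A =====
-- k1-scramble, written once (A's code repeats this exact sequence in the body and the tail)
def mmScrA (k1 : Int) : Int :=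
  let k1 := k1 * 3432918353 % 4294967296          -- (k1 * c1) & 0xffffffff
  let k1 := (k1 * 32768 + k1 / 131072) % 4294967296  -- ROTL32(k1,15): disjoint '|' = '+'
  k1 * 461845907 % 4294967296                      -- (k1 * c2) & 0xffffffff

-- one iteration of A's body loop: scramble k1, fold into h1
def mmBodyA (h1 k1 : Int) : Int :=
  let h1 := PySem.Int.bxor h1 (mmScrA k1)
  let h1 := (h1 * 8192 + h1 / 524288) % 4294967296  -- ROTL32(h1,13)
  (h1 * 5 + 3864292196) % 4294967296

-- A's 'while i < roundedEnd' loop, reading 4 bytes per step; stops when fewer than 4 bytes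
-- remain (exactly i = roundedEnd) and returns h1 together with the unread tail bytes.
def mmLoopA : List Int → Int → Int × List Int
  | a :: b :: c :: d :: rest, h1 =>
      mmLoopA rest (mmBodyA h1
        (a % 256 + b % 256 * 256 + c % 256 * 65536 + d % 256 * 16777216))
  | rest, h1 => (h1, rest)

-- A's finalization block
def mmFinA (h1 len : Int) : Int :=
  let h1 := PySem.Int.bxor h1 len
  let h1 := PySem.Int.bxor h1 (h1 / 65536)
  let h1 := h1 * 2246822507 % 4294967296
  let h1 := PySem.Int.bxor h1 (h1 / 8192)
  let h1 := h1 * 3266489909 % 4294967296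
  let h1 := PySem.Int.bxor h1 (h1 / 65536)
  h1 % 4294967296

def murmurhash3 (key : List Int) (seed : Int) : Int :=
  let h1 := seed % 4294967296                       -- seed & 0xffffffff
  let p := mmLoopA key h1
  let h1 := p.1
  let rest := p.2                                   -- bytes from index roundedEnd on
  let val := key.length % 4                         -- length & 0x03
  let k1 : Int := if val == 3 then rest.getD 2 0 % 256 * 65536 else 0
  let k1 := if val == 2 ∨ val == 3 then k1 + rest.getD 1 0 % 256 * 256 else k1
  let h1 := if 1 ≤ val then PySem.Int.bxor h1 (mmScrA (k1 + rest.getD 0 0 % 256)) else h1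
  mmFinA h1 key.length

-- ===== PORT B =====
def mmScrB (k1 : Int) : Int :=
  let k1 := k1 * 3432918353 % 4294967296
  let k1 := (k1 * 32768 + k1 / 131072) % 4294967296
  k1 * 461845907 % 4294967296

def mmMixB (h1 k1 : Int) : Int :=
  let h1 := PySem.Int.bxor h1 (mmScrB k1)
  let h1 := (h1 * 8192 + h1 / 524288) % 4294967296
  (h1 * 5 + 3864292196) % 4294967296

-- one byte of the stream: OR it into k1 at shift 8*cnt; flush when the group is full
def mmStepB (s : Int × Nat × Int) (b : Int) : Int × Nat × Int :=
  let k1 := s.1 + b % 256 * 2 ^ (8 * s.2.1)        -- k1 |= (byte & 0xff) << (8*cnt)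
  let cnt := s.2.1 + 1
  if cnt == 4 then (0, 0, mmMixB s.2.2 k1) else (k1, cnt, s.2.2)

def mmFinB (h1 len : Int) : Int :=
  let h1 := PySem.Int.bxor h1 len
  let h1 := PySem.Int.bxor h1 (h1 / 65536)
  let h1 := h1 * 2246822507 % 4294967296
  let h1 := PySem.Int.bxor h1 (h1 / 8192)
  let h1 := h1 * 3266489909 % 4294967296
  PySem.Int.bxor h1 (h1 / 65536)

def murmurhash3_alt (key : List Int) (seed : Int) : Int :=
  let s := key.foldl mmStepB (0, 0, seed % 4294967296)
  let h1 := if s.2.1 ≠ 0 then PySem.Int.bxor s.2.2 (mmScrB s.1) else s.2.2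
  mmFinB h1 key.length

-- ===== PRECONDITION & SPEC =====
def Spec_murmurhash3 (key : List Int) (seed : Int) (out : Int) : Prop := out = murmurhash3_alt key seed
instance (key : List Int) (seed : Int) (out : Int) : Decidable (Spec_murmurhash3 key seed out) := by unfold Spec_murmurhash3; infer_instance

-- ===== CLAIM (what is proved, stated in full; the proofs are below) =====
def Claim_equal_murmurhash3 : Prop := ∀ (key : List Int) (seed : Int), Dom_murmurhash3 key seed → Spec_murmurhash3 key seed (murmurhash3 key seed)

-- ===== LEMMAS AND PROOFS =====
-- the partial k1 that B's fold has accumulated from a group of fewer than 4 bytes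
def mmPartial : List Int → Int
  | [] => 0
  | [a] => a % 256
  | [a, b] => a % 256 + b % 256 * 256
  | [a, b, c] => a % 256 + b % 256 * 256 + c % 256 * 65536
  | _ => 0

lemma mmLoopA_rest_lt (xs : List Int) (h : Int) : (mmLoopA xs h).2.length < 4 := by
  induction xs, h using mmLoopA.induct with
  | case1 a b c d rest h ih => simpa [mmLoopA] using ih
  | case2 rest h hno =>
      match rest, hno with
      | [], _ => simp [mmLoopA]
      | [a], _ => simp [mmLoopA]
      | [a, b], _ => simp [mmLoopA]
      | [a, b, c], _ => simp [mmLoopA]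
      | a :: b :: c :: d :: r, hno => exact absurd rfl (hno a b c d r)

lemma mmLoopA_len (xs : List Int) (h : Int) : xs.length % 4 = (mmLoopA xs h).2.length := by
  induction xs, h using mmLoopA.induct with
  | case1 a b c d rest h ih => simp only [mmLoopA, List.length_cons]; rw [← ih]; omega
  | case2 rest h hno =>
      have hlt : (mmLoopA rest h).2.length < 4 := mmLoopA_rest_lt rest h
      match rest, hno with
      | [], _ => simp [mmLoopA]
      | [a], _ => simp [mmLoopA]
      | [a, b], _ => simp [mmLoopA]
      | [a, b, c], _ => simp [mmLoopA]
      | a :: b :: c :: d :: r, hno => exact absurd rfl (hno a b c d r)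

lemma mmScr_eq : mmScrA = mmScrB := rfl

lemma mmMix_eq : mmMixB = mmBodyA := rfl

lemma foldB_eq (xs : List Int) (h : Int) :
    xs.foldl mmStepB (0, 0, h) =
      (mmPartial (mmLoopA xs h).2, (mmLoopA xs h).2.length, (mmLoopA xs h).1) := by
  induction xs, h using mmLoopA.induct with
  | case1 a b c d rest h ih =>
      have hstep : (a :: b :: c :: d :: rest).foldl mmStepB (0, 0, h)
          = rest.foldl mmStepB
              (0, 0, mmBodyA h (a % 256 + b % 256 * 256 + c % 256 * 65536 + d % 256 * 16777216)) := by
        simp only [List.foldl_cons, mmStepB, mmMix_eq]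
        norm_num
      rw [hstep, ih]
      simp [mmLoopA]
  | case2 rest h hno =>
      match rest, hno with
      | [], _ => simp [mmLoopA, mmPartial]
      | [a], _ => simp [mmLoopA, mmPartial, mmStepB]
      | [a, b], _ => simp [mmLoopA, mmPartial, mmStepB]
      | [a, b, c], _ => simp [mmLoopA, mmPartial, mmStepB]
      | a :: b :: c :: d :: r, hno => exact absurd rfl (hno a b c d r)

-- the final '& 0xffffffff' of A is a no-op: the value is already a 32-bit xor of 32-bit values
lemma bxor_shift_mod (z : Int) (h0 : 0 ≤ z) (h1 : z < 4294967296) :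
    PySem.Int.bxor z (z / 65536) % 4294967296 = PySem.Int.bxor z (z / 65536) := by
  have hd0 : 0 ≤ z / 65536 := Int.ediv_nonneg h0 (by norm_num)
  have hle : z / 65536 ≤ z := Int.ediv_le_self _ h0
  rw [PySem.Int.bxor_of_nonneg h0 hd0]
  have hx : z.toNat ^^^ (z / 65536).toNat < 2 ^ 32 :=
    Nat.xor_lt_two_pow (by omega) (by omega)
  have : ((z.toNat ^^^ (z / 65536).toNat : Nat) : Int) < 4294967296 := by exact_mod_cast hx
  exact Int.emod_eq_of_lt (by positivity) this

lemma mmFin_eq (h len : Int) : mmFinA h len = mmFinB h len := by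
  unfold mmFinA mmFinB
  exact bxor_shift_mod _ (Int.emod_nonneg _ (by norm_num)) (Int.emod_lt_of_pos _ (by norm_num))

-- ===== VERDICT (by name: the statement is the Claim_ definition above) =====
theorem murmurhash3_spec : Claim_equal_murmurhash3 := by
  intro key seed _
  unfold Spec_murmurhash3 murmurhash3 murmurhash3_alt
  rw [foldB_eq]
  have hlen := mmLoopA_len key (seed % 4294967296)
  rcases hrest : (mmLoopA key (seed % 4294967296)).2 with _ | ⟨a, _ | ⟨b, _ | ⟨c, _ | ⟨d, r⟩⟩⟩⟩ <;>
    rw [hrest] at hlen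
  · simp [hlen, mmFin_eq]
  · simp [hlen, hrest, mmPartial, mmFin_eq, mmScr_eq]
  · simp [hlen, hrest, mmPartial, mmFin_eq, mmScr_eq]
    congr 2
    ring
  · simp [hlen, hrest, mmPartial, mmFin_eq, mmScr_eq]
    congr 2
    ring
  · have := mmLoopA_rest_lt key (seed % 4294967296)
    rw [hrest] at this
    simp at this
    omega
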